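-- pv_equiv track=rewrite | github.com/vlad-a-c/PlayPalace11 | server/game_utils/teams.py | get_team_modes_for_player_count_internal
-- ===== SOURCE A (Python) =====
-- def get_team_modes_for_player_count_internal(num_players: int) -> list[str]:
--     """
--     Get valid team mode options for a given number of players.
--     Returns internal format strings.
--
--     Args:
--         num_players: Number of players in the game.
--
--     Returns:
--         List of valid team mode strings in internal format.
--     """
--     modes = ["individual"]
--
--     if num_players < 2:
--         return modes
--
--     # Generate symmetric team modes (2v2, 3v3, etc.)
--     for team_size in range(2, num_players // 2 + 1):
--         num_teams = num_players // team_size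
--         if num_teams >= 2 and num_teams * team_size == num_players:
--             mode = "v".join([str(team_size)] * num_teams)
--             modes.append(mode)
--
--     # Could add asymmetric modes like "2v3" for 5 players
--     # but keeping it simple for now
--
--     return modes
-- ===== SOURCE B (Python) =====
-- def get_team_modes_for_player_count_internal(num_players: int) -> list[str]:
--     """
--     Get valid team mode options for a given number of players.
--     Returns internal format strings.
--
--     Faster variant: enumerate divisors only up to sqrt(num_players),
--     pairing each small divisor i with its cofactor num_players // i,
--     so team sizes come out in ascending order without an O(n) scan.
--     """
--     modes = ["individual"]
--     if num_players < 2: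
--         return modes
--     small = []
--     large = []
--     i = 1
--     while i * i <= num_players:
--         if num_players % i == 0:
--             small.append(i)
--             if i != num_players // i:
--                 large.append(num_players // i)
--         i += 1
--     for team_size in small + large[::-1]:
--         num_teams = num_players // team_size
--         if team_size >= 2 and num_teams >= 2:
--             modes.append("v".join([str(team_size)] * num_teams))
--     return modes
-- ===== Notes on version B (the rewrite author's own statement) =====
-- stated objective: faster
-- what changed: B enumerates divisors only up to sqrt(num_players), pairing each divisor i with its cofactor num_players//i to produce the team sizes in ascending order, instead of A's trial division over every candidate team size up to num_players//2.
import Mathlib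
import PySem

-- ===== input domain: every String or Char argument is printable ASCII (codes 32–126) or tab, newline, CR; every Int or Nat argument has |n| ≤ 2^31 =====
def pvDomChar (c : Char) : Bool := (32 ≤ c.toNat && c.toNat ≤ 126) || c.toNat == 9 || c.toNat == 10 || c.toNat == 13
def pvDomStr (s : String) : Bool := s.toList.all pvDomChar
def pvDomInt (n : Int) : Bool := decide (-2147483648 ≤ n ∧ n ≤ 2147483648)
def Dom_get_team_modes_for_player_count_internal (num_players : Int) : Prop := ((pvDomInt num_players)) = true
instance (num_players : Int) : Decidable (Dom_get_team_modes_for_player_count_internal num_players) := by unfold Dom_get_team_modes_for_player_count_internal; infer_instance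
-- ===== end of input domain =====

-- B enumerates divisors only up to sqrt(num_players) (pairing each with its cofactor)
-- instead of A's scan of every candidate team size up to num_players // 2.

-- ===== PORT A =====
def get_team_modes_for_player_count_internal (num_players : Int) : List String :=
  let modes : List String := ["individual"]
  if num_players < 2 then modes
  else
    (PySem.List.pyRange 2 (PySem.Int.floordiv num_players 2 + 1)).foldl
      (fun modes team_size =>
        let num_teams := PySem.Int.floordiv num_players team_size
        if decide (2 ≤ num_teams) && decide (num_teams * team_size = num_players) then
          modes ++ [PySem.Str.join "v" (List.replicate num_teams.toNat (PySem.Int.toStr team_size))]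
        else modes) modes

-- ===== PORT B =====
-- the while loop of Source B: i counts 1,2,… while i*i ≤ n, appending i to small and
-- (when distinct) n // i to large exactly as the Python does
def pvCollect (n : Int) (small large : List Int) (i : Nat) : List Int × List Int :=
  if h : (i : Int) * (i : Int) ≤ n then
    if PySem.Int.mod n (i : Int) = 0 then
      pvCollect n (small ++ [(i : Int)])
        (if (i : Int) ≠ PySem.Int.floordiv n (i : Int) then
          large ++ [PySem.Int.floordiv n (i : Int)] else large) (i + 1)
    else pvCollect n small large (i + 1)
  else (small, large)
termination_by n.toNat + 1 - i * i
decreasing_by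
  all_goals
    have h1 : ((i * i : Nat) : Int) ≤ n := by push_cast; exact h
    have h2 : i * i ≤ n.toNat := by
      have h2' := Int.toNat_le_toNat h1
      rwa [Int.toNat_natCast] at h2'
    have h3 : i * i < (i + 1) * (i + 1) := by nlinarith
    exact Nat.sub_lt_sub_left (Nat.lt_succ_of_le h2) h3

def get_team_modes_for_player_count_internal_alt (num_players : Int) : List String :=
  let modes : List String := ["individual"]
  if num_players < 2 then modes
  else
    let sl := pvCollect num_players [] [] 1
    (sl.1 ++ sl.2.reverse).foldl
      (fun modes team_size =>
        let num_teams := PySem.Int.floordiv num_players team_size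
        if decide (2 ≤ team_size) && decide (2 ≤ num_teams) then
          modes ++ [PySem.Str.join "v" (List.replicate num_teams.toNat (PySem.Int.toStr team_size))]
        else modes) modes

-- ===== PRECONDITION & SPEC =====
def Spec_get_team_modes_for_player_count_internal (num_players : Int) (out : List String) : Prop := out = get_team_modes_for_player_count_internal_alt num_players
instance (num_players : Int) (out : List String) : Decidable (Spec_get_team_modes_for_player_count_internal num_players out) := by unfold Spec_get_team_modes_for_player_count_internal; infer_instance

-- ===== CLAIM (what is proved, stated in full; the proofs are below) =====
def Claim_equal_get_team_modes_for_player_count_internal : Prop := ∀ (num_players : Int), Dom_get_team_modes_for_player_count_internal num_players → Spec_get_team_modes_for_player_count_internal num_players (get_team_modes_for_player_count_internal num_players)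

-- ===== LEMMAS AND PROOFS =====

-- proof-side ghosts (Nat level): the divisors of m up to sqrt m, and their cofactors
def pvDivS (m : Nat) : List Nat := (List.range' 1 (Nat.sqrt m)).filter (fun d => m % d == 0)
def pvDivL (m : Nat) : List Nat :=
  ((pvDivS m).filter (fun d => decide (d ≠ m / d))).map (fun d => m / d)
-- the team sizes both programs keep
def pvP (m d : Nat) : Prop := d ∣ m ∧ 2 ≤ d ∧ 2 ≤ m / d
-- the Nat-level team-size lists of A and of B
def pvNa (m : Nat) : List Nat :=
  (List.range' 2 (m / 2 + 1 - 2)).filter (fun d => decide (2 ≤ m / d) && decide (m / d * d = m))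
def pvNb (m : Nat) : List Nat :=
  (pvDivS m).filter (fun d => decide (2 ≤ d) && decide (2 ≤ m / d)) ++
    ((pvDivL m).filter (fun d => decide (2 ≤ d) && decide (2 ≤ m / d))).reverse
-- the mode string both programs build for team size d
def pvF (m d : Nat) : String :=
  PySem.Str.join "v" (List.replicate (m / d) (PySem.Int.toStr (d : Int)))
-- deterministic Nat→Int casting of lists (fixes one elaboration for all lemmas)
def pvCastL (l : List Nat) : List Int := l.map (fun d : Nat => (d : Int))
def pvCastDivL (m : Nat) (l : List Nat) : List Int := l.map (fun d : Nat => ((m / d : Nat) : Int))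

lemma pvCastL_append (l₁ l₂ : List Nat) : pvCastL (l₁ ++ l₂) = pvCastL l₁ ++ pvCastL l₂ := by
  simp [pvCastL]

lemma pvCastL_reverse (l : List Nat) : pvCastL l.reverse = (pvCastL l).reverse := by
  simp [pvCastL]

lemma pvCastDivL_eq (m : Nat) :
    pvCastDivL m ((pvDivS m).filter (fun d => decide (d ≠ m / d))) = pvCastL (pvDivL m) := by
  unfold pvCastDivL pvCastL pvDivL
  rw [List.map_map]
  rfl

lemma pvRange_cast (a b : Nat) :
    PySem.List.pyRange (a : Int) (b : Int) = pvCastL (List.range' a (b - a)) := by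
  rw [PySem.List.pyRange_of_pos _ _ (by norm_num : (0:Int) < 1)]
  unfold pvCastL
  by_cases h : a < b
  · have h' : (a : Int) < (b : Int) := by exact_mod_cast h
    rw [if_pos h']
    have he : ((b : Int) - a + 1 - 1) / 1 = ((b - a : Nat) : Int) := by
      push_cast [Nat.cast_sub h.le]; ring_nf; simp
    rw [he, Int.toNat_natCast, List.range'_eq_map_range, List.map_map]
    apply List.map_congr_left
    intro x _
    simp only [Function.comp_apply]
    push_cast; ring
  · have h' : ¬ ((a : Int) < (b : Int)) := by exact_mod_cast h
    rw [if_neg h']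
    have : b - a = 0 := by omega
    simp [this]

lemma pvRange_cast2 (b : Nat) :
    PySem.List.pyRange (2 : Int) (b : Int) = pvCastL (List.range' 2 (b - 2)) := by
  have h := pvRange_cast 2 b
  norm_num at h
  exact h

lemma pvCollect_spec (m : Nat) : ∀ (k i : Nat), 1 ≤ i → Nat.sqrt m + 1 - i = k →
    ∀ (small large : List Int),
    pvCollect (m : Int) small large i =
      (small ++ pvCastL ((List.range' i (Nat.sqrt m + 1 - i)).filter (fun d => m % d == 0)),
       large ++ pvCastDivL m (((List.range' i (Nat.sqrt m + 1 - i)).filter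
          (fun d => m % d == 0)).filter (fun d => decide (d ≠ m / d)))) := by
  intro k
  induction k with
  | zero =>
    intro i hi hk small large
    have hgt : Nat.sqrt m < i := by omega
    have hno : ¬ ((i : Int) * (i : Int) ≤ (m : Int)) := by
      have hmlt : m < i * i := Nat.sqrt_lt.mp hgt
      intro hc
      have : (i * i : Nat) ≤ m := by exact_mod_cast (by push_cast; exact hc : ((i*i : Nat) : Int) ≤ (m : Int))
      omega
    rw [pvCollect, dif_neg hno]
    rw [hk]
    simp [pvCastL, pvCastDivL]
  | succ k ih =>
    intro i hi hk small large
    have hle : i ≤ Nat.sqrt m := by omega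
    have hii : (i : Int) * (i : Int) ≤ (m : Int) := by
      have : i * i ≤ m := Nat.le_sqrt.mp hle
      exact_mod_cast this
    rw [pvCollect, dif_pos hii]
    have hrange : List.range' i (Nat.sqrt m + 1 - i) =
        i :: List.range' (i+1) (Nat.sqrt m + 1 - (i+1)) := by
      have h1 : Nat.sqrt m + 1 - i = (Nat.sqrt m + 1 - (i+1)) + 1 := by omega
      rw [h1, List.range'_succ]
    rw [hrange]
    have hmod : PySem.Int.mod (m : Int) (i : Int) = ((m % i : Nat) : Int) :=
      PySem.Int.mod_natCast m i
    have hfd : PySem.Int.floordiv (m : Int) (i : Int) = ((m / i : Nat) : Int) :=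
      PySem.Int.floordiv_natCast m i
    by_cases hdvd : m % i = 0
    · rw [if_pos (by rw [hmod, hdvd]; simp)]
      by_cases hne : i ≠ m / i
      · rw [if_pos (by rw [hfd]; exact_mod_cast hne)]
        rw [ih (i+1) (by omega) (by omega)]
        simp [List.filter_cons, hdvd, hne, pvCastL, pvCastDivL]
      · rw [if_neg (by rw [hfd]; exact_mod_cast hne)]
        rw [ih (i+1) (by omega) (by omega)]
        simp only [not_not] at hne
        simp [List.filter_cons, hdvd, ← hne, pvCastL, pvCastDivL]
    · rw [if_neg (by rw [hmod]; exact_mod_cast hdvd)]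
      rw [ih (i+1) (by omega) (by omega)]
      simp [List.filter_cons, hdvd, pvCastL, pvCastDivL]

lemma pvMod_dvd {m d : Nat} : (m % d == 0) = true ↔ d ∣ m := by
  rw [beq_iff_eq]
  constructor
  · exact Nat.dvd_of_mod_eq_zero
  · rintro ⟨c, rfl⟩
    exact Nat.mul_mod_right d c

lemma mem_pvDivS {m d : Nat} : d ∈ pvDivS m ↔ 1 ≤ d ∧ d ≤ Nat.sqrt m ∧ d ∣ m := by
  unfold pvDivS
  simp only [List.mem_filter, List.mem_range'_1, pvMod_dvd]
  constructor
  · rintro ⟨⟨h1, h2⟩, h3⟩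
    exact ⟨h1, by omega, h3⟩
  · rintro ⟨h1, h2, h3⟩
    exact ⟨⟨h1, by omega⟩, h3⟩

lemma pvSqrt_mul_le (m : Nat) : Nat.sqrt m * Nat.sqrt m ≤ m := by
  simpa [pow_two] using Nat.sqrt_le' m

lemma pvCofactor_big {m d : Nat} (hdvd : d ∣ m) (hd1 : 1 ≤ d)
    (hds : d ≤ Nat.sqrt m) (hne : d ≠ m / d) : Nat.sqrt m < m / d := by
  by_contra hx
  push_neg at hx
  have hmd : m / d * d = m := Nat.div_mul_cancel hdvd
  have hsq := pvSqrt_mul_le m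
  rcases lt_trichotomy d (m / d) with h | h | h
  · have h0 : 0 < m / d := lt_of_le_of_lt (Nat.zero_le d) h
    have : m < m := by
      calc m = m / d * d := hmd.symm
        _ < m / d * (m / d) := by exact mul_lt_mul_of_pos_left h h0
        _ ≤ Nat.sqrt m * Nat.sqrt m := Nat.mul_le_mul hx hx
        _ ≤ m := hsq
    exact absurd this (lt_irrefl m)
  · exact hne h
  · have : m < m := by
      calc m = m / d * d := hmd.symm
        _ < d * d := by exact mul_lt_mul_of_pos_right h (by omega)
        _ ≤ Nat.sqrt m * Nat.sqrt m := Nat.mul_le_mul hds hds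
        _ ≤ m := hsq
    exact absurd this (lt_irrefl m)

lemma pvDiv_le_sqrt {m x : Nat} (hdvd : x ∣ m) (hx : Nat.sqrt m < x) : m / x ≤ Nat.sqrt m := by
  by_contra h
  push_neg at h
  have hmx : x * (m / x) = m := Nat.mul_div_cancel' hdvd
  have hlt := Nat.lt_succ_sqrt m
  rw [Nat.succ_eq_add_one] at hlt
  have hge : (Nat.sqrt m + 1) * (Nat.sqrt m + 1) ≤ m := by
    calc (Nat.sqrt m + 1) * (Nat.sqrt m + 1) ≤ x * (m / x) := Nat.mul_le_mul hx h
      _ = m := hmx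
  linarith

lemma mem_pvDivL {m x : Nat} (hm : 1 ≤ m) :
    x ∈ pvDivL m ↔ x ∣ m ∧ Nat.sqrt m < x ∧ x ≤ m := by
  constructor
  · intro hx
    rcases List.mem_map.mp hx with ⟨d, hd, rfl⟩
    rcases List.mem_filter.mp hd with ⟨hdS, hdne⟩
    rcases mem_pvDivS.mp hdS with ⟨hd1, hds, hdvd⟩
    have hne : d ≠ m / d := by simpa using hdne
    exact ⟨Nat.div_dvd_of_dvd hdvd, pvCofactor_big hdvd hd1 hds hne,
      Nat.div_le_self m d⟩
  · rintro ⟨hdvd, hgt, hle⟩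
    have hx0 : 0 < x := by omega
    have hd : m / x ∣ m := Nat.div_dvd_of_dvd hdvd
    have hdd : m / (m / x) = x := Nat.div_div_self hdvd (by omega)
    have hd1 : 1 ≤ m / x := (Nat.le_div_iff_mul_le hx0).mpr (by omega)
    have hds : m / x ≤ Nat.sqrt m := pvDiv_le_sqrt hdvd hgt
    refine List.mem_map.mpr ⟨m / x, List.mem_filter.mpr ⟨mem_pvDivS.mpr ⟨hd1, hds, hd⟩, ?_⟩, hdd⟩
    simp [hdd]
    omega

lemma mem_pvNa {m d : Nat} (hm : 2 ≤ m) : d ∈ pvNa m ↔ pvP m d := by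
  unfold pvNa pvP
  simp only [List.mem_filter, List.mem_range'_1, Bool.and_eq_true, decide_eq_true_eq]
  constructor
  · rintro ⟨⟨h2, hlt⟩, hdm, hmul⟩
    refine ⟨⟨m / d, by rw [Nat.mul_comm]; exact hmul.symm⟩, h2, hdm⟩
  · rintro ⟨hdvd, h2, hdm⟩
    have hmul : m / d * d = m := Nat.div_mul_cancel hdvd
    have hdle : d ≤ m / 2 := (Nat.le_div_iff_mul_le (by omega)).mpr (by nlinarith)
    have hh : 1 ≤ m / 2 := by omega
    exact ⟨⟨h2, by omega⟩, hdm, hmul⟩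

lemma mem_pvNb {m d : Nat} (hm : 2 ≤ m) : d ∈ pvNb m ↔ pvP m d := by
  unfold pvNb pvP
  simp only [List.mem_append, List.mem_reverse, List.mem_filter, Bool.and_eq_true,
    decide_eq_true_eq]
  constructor
  · rintro (⟨hS, h2, hdm⟩ | ⟨hL, h2, hdm⟩)
    · exact ⟨(mem_pvDivS.mp hS).2.2, h2, hdm⟩
    · exact ⟨((mem_pvDivL (by omega)).mp hL).1, h2, hdm⟩
  · rintro ⟨hdvd, h2, hdm⟩
    by_cases hs : d ≤ Nat.sqrt m
    · exact Or.inl ⟨mem_pvDivS.mpr ⟨by omega, hs, hdvd⟩, h2, hdm⟩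
    · have hle : d ≤ m := Nat.le_of_dvd (by omega) hdvd
      exact Or.inr ⟨(mem_pvDivL (by omega)).mpr ⟨hdvd, by omega, hle⟩, h2, hdm⟩

lemma pvDivS_pairwise (m : Nat) : (pvDivS m).Pairwise (· < ·) :=
  (List.pairwise_lt_range' _).filter _

lemma pvDivL_pairwise (m : Nat) (hm : 1 ≤ m) : (pvDivL m).Pairwise (· > ·) := by
  unfold pvDivL
  rw [List.pairwise_map]
  refine List.Pairwise.imp_of_mem ?_ ((pvDivS_pairwise m).filter _)
  intro a b ha hb hab
  have hda : a ∣ m := (mem_pvDivS.mp (List.mem_of_mem_filter ha)).2.2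
  have hdb : b ∣ m := (mem_pvDivS.mp (List.mem_of_mem_filter hb)).2.2
  have ha1 : 1 ≤ a := (mem_pvDivS.mp (List.mem_of_mem_filter ha)).1
  have hle : m / b ≤ m / a := Nat.div_le_div_left (le_of_lt hab) (by omega)
  have hne : m / b ≠ m / a := by
    intro he
    have h1 : m / (m / a) = a := Nat.div_div_self hda (by omega)
    have h2 : m / (m / b) = b := Nat.div_div_self hdb (by omega)
    rw [he] at h2
    omega
  exact lt_of_le_of_ne hle hne

lemma pvNa_pairwise (m : Nat) : (pvNa m).Pairwise (· < ·) :=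
  (List.pairwise_lt_range' _).filter _

lemma pvNb_pairwise (m : Nat) (hm : 2 ≤ m) : (pvNb m).Pairwise (· < ·) := by
  unfold pvNb
  rw [List.pairwise_append]
  refine ⟨(pvDivS_pairwise m).filter _, ?_, ?_⟩
  · rw [List.pairwise_reverse]
    exact (pvDivL_pairwise m (by omega)).filter _
  · intro a ha b hb
    have haS : a ∈ pvDivS m := List.mem_of_mem_filter ha
    have hbL : b ∈ pvDivL m := List.mem_of_mem_filter (List.mem_reverse.mp hb)
    have h1 : a ≤ Nat.sqrt m := (mem_pvDivS.mp haS).2.1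
    have h2 : Nat.sqrt m < b := ((mem_pvDivL (by omega)).mp hbL).2.1
    omega

lemma pvNa_eq_pvNb (m : Nat) (hm : 2 ≤ m) : pvNa m = pvNb m := by
  have hpa := pvNa_pairwise m
  have hpb := pvNb_pairwise m hm
  have hperm : (pvNa m).Perm (pvNb m) := by
    refine (List.perm_ext_iff_of_nodup ?_ ?_).mpr ?_
    · exact hpa.imp (fun h => Nat.ne_of_lt h)
    · exact hpb.imp (fun h => Nat.ne_of_lt h)
    · intro d
      rw [mem_pvNa hm, mem_pvNb hm]
  exact List.eq_of_perm_of_sorted (fun a b _ _ h1 h2 => le_antisymm h1 h2)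
    (hpa.imp le_of_lt) (hpb.imp le_of_lt) hperm

lemma pvFoldA (m : Nat) (init : List String) (l : List Int) :
    l.foldl (fun modes team_size =>
        let num_teams := PySem.Int.floordiv (m : Int) team_size
        if decide (2 ≤ num_teams) && decide (num_teams * team_size = (m : Int)) then
          modes ++ [PySem.Str.join "v" (List.replicate num_teams.toNat (PySem.Int.toStr team_size))]
        else modes) init
      = init ++ (l.filter (fun ts => decide (2 ≤ PySem.Int.floordiv (m : Int) ts) &&
            decide (PySem.Int.floordiv (m : Int) ts * ts = (m : Int)))).map
          (fun ts => PySem.Str.join "v"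
            (List.replicate (PySem.Int.floordiv (m : Int) ts).toNat (PySem.Int.toStr ts))) :=
  PySem.List.foldl_append_if _ _ l init

lemma pvFoldB (m : Nat) (init : List String) (l : List Int) :
    l.foldl (fun modes team_size =>
        let num_teams := PySem.Int.floordiv (m : Int) team_size
        if decide (2 ≤ team_size) && decide (2 ≤ num_teams) then
          modes ++ [PySem.Str.join "v" (List.replicate num_teams.toNat (PySem.Int.toStr team_size))]
        else modes) init
      = init ++ (l.filter (fun ts => decide (2 ≤ ts) &&
            decide (2 ≤ PySem.Int.floordiv (m : Int) ts))).map
          (fun ts => PySem.Str.join "v"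
            (List.replicate (PySem.Int.floordiv (m : Int) ts).toNat (PySem.Int.toStr ts))) :=
  PySem.List.foldl_append_if _ _ l init

-- the cast-level mode builder agrees with pvF on Nat inputs
lemma pvF_cast (m : Nat) (l : List Nat) :
    (pvCastL l).map (fun ts => PySem.Str.join "v"
        (List.replicate (PySem.Int.floordiv (m : Int) ts).toNat (PySem.Int.toStr ts)))
      = l.map (pvF m) := by
  unfold pvCastL
  rw [List.map_map]
  apply List.map_congr_left
  intro d _
  simp only [Function.comp_apply, PySem.Int.floordiv_natCast, Int.toNat_natCast, pvF]

-- A's Int-level filter over cast lists is the Nat-level filter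
lemma pvFilterA_cast (m : Nat) (l : List Nat) :
    (pvCastL l).filter (fun ts => decide (2 ≤ PySem.Int.floordiv (m : Int) ts) &&
        decide (PySem.Int.floordiv (m : Int) ts * ts = (m : Int)))
      = pvCastL (l.filter (fun d => decide (2 ≤ m / d) && decide (m / d * d = m))) := by
  unfold pvCastL
  rw [List.filter_map]
  apply congrArg
  apply List.filter_congr
  intro d _
  simp only [Function.comp_apply, PySem.Int.floordiv_natCast]
  have e1 : decide (2 ≤ ((m / d : Nat) : Int)) = decide (2 ≤ m / d) :=
    decide_eq_decide.mpr (by exact_mod_cast Iff.rfl)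
  have e2 : decide (((m / d : Nat) : Int) * (d : Int) = (m : Int)) = decide (m / d * d = m) :=
    decide_eq_decide.mpr (by exact_mod_cast Iff.rfl)
  rw [e1, e2]

-- B's Int-level filter over cast lists is the Nat-level filter
lemma pvFilterB_cast (m : Nat) (l : List Nat) :
    (pvCastL l).filter (fun ts => decide (2 ≤ ts) &&
        decide (2 ≤ PySem.Int.floordiv (m : Int) ts))
      = pvCastL (l.filter (fun d => decide (2 ≤ d) && decide (2 ≤ m / d))) := by
  unfold pvCastL
  rw [List.filter_map]
  apply congrArg
  apply List.filter_congr
  intro d _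
  simp only [Function.comp_apply, PySem.Int.floordiv_natCast]
  have e1 : decide (2 ≤ ((d : Nat) : Int)) = decide (2 ≤ d) :=
    decide_eq_decide.mpr (by exact_mod_cast Iff.rfl)
  have e2 : decide (2 ≤ ((m / d : Nat) : Int)) = decide (2 ≤ m / d) :=
    decide_eq_decide.mpr (by exact_mod_cast Iff.rfl)
  rw [e1, e2]

-- reduction of port A to the Nat-level list
lemma pvA_eq (m : Nat) (hm : 2 ≤ m) :
    get_team_modes_for_player_count_internal (m : Int) =
      "individual" :: (pvNa m).map (pvF m) := by
  have hnot : ¬ ((m : Int) < 2) := by push_cast; omega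
  simp only [get_team_modes_for_player_count_internal, if_neg hnot]
  rw [pvFoldA]
  have hb : PySem.Int.floordiv (m : Int) 2 + 1 = ((m / 2 + 1 : Nat) : Int) := by
    have hfd : PySem.Int.floordiv (m : Int) 2 = ((m / 2 : Nat) : Int) := by
      exact_mod_cast PySem.Int.floordiv_natCast m 2
    rw [hfd]; push_cast; ring
  rw [hb, pvRange_cast2, pvFilterA_cast, pvF_cast, List.singleton_append]
  rfl

-- reduction of port B to the Nat-level list
lemma pvB_eq (m : Nat) (hm : 2 ≤ m) :
    get_team_modes_for_player_count_internal_alt (m : Int) =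
      "individual" :: (pvNb m).map (pvF m) := by
  have hnot : ¬ ((m : Int) < 2) := by push_cast; omega
  simp only [get_team_modes_for_player_count_internal_alt, if_neg hnot]
  have hc := pvCollect_spec m (Nat.sqrt m) 1 (le_refl 1) (by omega) [] []
  simp only [Nat.add_sub_cancel, List.nil_append] at hc
  have hS : (List.range' 1 (Nat.sqrt m)).filter (fun d => m % d == 0) = pvDivS m := rfl
  rw [hS, pvCastDivL_eq] at hc
  rw [hc]
  dsimp only
  rw [pvFoldB, ← pvCastL_reverse, ← pvCastL_append, pvFilterB_cast, pvF_cast,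
    List.singleton_append, List.filter_append, List.filter_reverse]
  rfl

-- ===== VERDICT (by name: the statement is the Claim_ definition above) =====
theorem get_team_modes_for_player_count_internal_spec : Claim_equal_get_team_modes_for_player_count_internal := by
  intro n _
  unfold Spec_get_team_modes_for_player_count_internal
  by_cases h : n < 2
  · simp [get_team_modes_for_player_count_internal,
      get_team_modes_for_player_count_internal_alt, h]
  · push_neg at h
    obtain ⟨m, rfl⟩ : ∃ m : Nat, n = (m : Int) := ⟨n.toNat, (Int.toNat_of_nonneg (by omega)).symm⟩
    have hm : 2 ≤ m := by exact_mod_cast h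
    rw [pvA_eq m hm, pvB_eq m hm, pvNa_eq_pvNb m hm]
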